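-- pv_equiv track=rewrite | github.com/biskoi/cs-sprint-challenge-hash-tables | hashtables/ex4/ex4.py | has_negatives
-- ===== SOURCE A (Python) =====
-- def has_negatives(arr):
--     sums = {}
--
--     for num in arr:
--         pos = abs(num)
--
--         if pos == 0:
--             continue
--
--         if pos not in sums:
--             sums[pos] = num
--             continue
--
--         sums[pos] += num
--
--     suspects = []
--
--     for items in sums:
--
--         if sums[items] == 0:
--             suspects.append(items)
--
--     return suspects
-- ===== SOURCE B (Python) =====
-- def has_negatives(arr):
--     # count signed occurrences once, dedup the nonzero magnitudes in first-seen
--     # order, then a magnitude's signed values cancel iff m and -m occur equally often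
--     counts = {}
--     for num in arr:
--         counts[num] = counts.get(num, 0) + 1
--     mags = []
--     seen = set()
--     for num in arr:
--         m = abs(num)
--         if m != 0 and m not in seen:
--             seen.add(m)
--             mags.append(m)
--     return [m for m in mags if counts.get(m, 0) == counts.get(-m, 0)]
-- ===== Notes on version B (the rewrite author's own statement) =====
-- stated objective: alternative
-- what changed: B never accumulates per-magnitude running sums: it counts the SIGNED values once (a plain counter), dedups the nonzero magnitudes in first-seen order with a set, and selects a magnitude by the cancellation test counts[m] == counts[-m], instead of A's abs-keyed dict of running totals with a contains branch and a second key loop.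
import Mathlib
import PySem

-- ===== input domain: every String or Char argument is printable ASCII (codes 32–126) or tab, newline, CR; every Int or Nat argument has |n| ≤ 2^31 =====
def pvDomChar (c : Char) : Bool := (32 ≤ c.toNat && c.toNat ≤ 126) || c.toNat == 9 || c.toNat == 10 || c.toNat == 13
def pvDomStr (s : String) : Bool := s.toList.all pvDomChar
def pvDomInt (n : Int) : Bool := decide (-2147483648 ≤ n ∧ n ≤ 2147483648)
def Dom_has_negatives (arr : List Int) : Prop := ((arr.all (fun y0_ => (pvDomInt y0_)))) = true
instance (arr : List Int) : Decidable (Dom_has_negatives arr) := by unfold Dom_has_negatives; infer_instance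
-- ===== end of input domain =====

-- B keeps no per-magnitude running sums: it counts the signed values once, dedups the
-- nonzero magnitudes in first-seen order with a set, and selects m by counts[m]==counts[-m]
-- (objective: alternative).

-- ===== PORT A =====
-- one loop step: pos = abs(num); skip 0; first sight stores num, else sums[pos] += num
def hnStepA (d : PySem.Dict Int Int) (num : Int) : PySem.Dict Int Int :=
  let pos := |num|
  if pos = 0 then d
  else if d.contains pos = false then d.insert pos num
  else d.insert pos (d.getD pos 0 + num)   -- sums[pos] += num (key present, so getD is exact)

def has_negatives (arr : List Int) : List Int :=
  let sums := arr.foldl hnStepA PySem.Dict.empty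
  -- for items in sums: if sums[items] == 0: suspects.append(items)
  sums.keys.foldl (fun suspects items =>
    if sums.getD items 0 = 0 then suspects ++ [items] else suspects) []

-- ===== PORT B =====
-- counts[num] = counts.get(num, 0) + 1
def hnCountStep (d : PySem.Dict Int Int) (num : Int) : PySem.Dict Int Int :=
  d.insert num (d.getD num 0 + 1)

-- m = abs(num); if m != 0 and m not in seen: seen.add(m); mags.append(m)
def hnStepB (p : List Int × PySem.Set Int) (num : Int) : List Int × PySem.Set Int :=
  let m := |num|
  if m ≠ 0 ∧ ¬ (m ∈ p.2) then (p.1 ++ [m], p.2.add m) else p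

def has_negatives_alt (arr : List Int) : List Int :=
  let counts := arr.foldl hnCountStep PySem.Dict.empty
  let mags := (arr.foldl hnStepB ([], PySem.Set.empty)).1
  mags.filter (fun m => counts.getD m 0 == counts.getD (-m) 0)

-- ===== PRECONDITION & SPEC =====
def Spec_has_negatives (arr : List Int) (out : List Int) : Prop := out = has_negatives_alt arr
instance (arr : List Int) (out : List Int) : Decidable (Spec_has_negatives arr out) := by unfold Spec_has_negatives; infer_instance

-- ===== CLAIM (what is proved, stated in full; the proofs are below) =====
def Claim_equal_has_negatives : Prop := ∀ (arr : List Int), Dom_has_negatives arr → Spec_has_negatives arr (has_negatives arr)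

-- ===== LEMMAS AND PROOFS =====

-- proof-side view of B's dedup loop on the magnitude list alone
def hnMagStep (mags : List Int) (num : Int) : List Int :=
  if |num| ≠ 0 ∧ |num| ∉ mags then mags ++ [|num|] else mags

-- B's pair fold (list + seen set) projects to the list-only fold when the set's
-- members are exactly the list's members
theorem hn_pair_fst (l : List Int) (mags : List Int) (seen : PySem.Set Int)
    (h : ∀ x, x ∈ seen ↔ x ∈ mags) :
    (l.foldl hnStepB (mags, seen)).1 = l.foldl hnMagStep mags := by
  induction l generalizing mags seen with
  | nil => rfl
  | cons num tl ih =>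
    simp only [List.foldl_cons]
    by_cases hc : |num| ≠ 0 ∧ |num| ∉ mags
    · have hb : hnStepB (mags, seen) num = (mags ++ [|num|], seen.add |num|) := by
        simp [hnStepB, hc.1, (h _).not.mpr hc.2]
      have hm : hnMagStep mags num = mags ++ [|num|] := by simp [hnMagStep, hc]
      rw [hb, hm]
      exact ih _ _ (fun x => by
        rw [PySem.Set.mem_add, List.mem_append, List.mem_singleton, h x, Or.comm])
    · have hb : hnStepB (mags, seen) num = (mags, seen) := by
        rcases not_and_or.mp hc with h1 | h1
        · simp [hnStepB, not_not.mp h1]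
        · simp [hnStepB, (h _).mpr (not_not.mp h1)]
      have hm : hnMagStep mags num = mags := by
        unfold hnMagStep; rw [if_neg hc]
      rw [hb, hm]
      exact ih _ _ h

-- loop invariant: A's dict keys are exactly B's magnitude list, every key is positive,
-- and A's running total at k is the signed sum of the entries of magnitude k seen so far
theorem hn_loop_inv (l : List Int) (d : PySem.Dict Int Int) (mags : List Int)
    (hk : d.keys = mags) (hpos : ∀ k ∈ mags, 0 < k) :
    (l.foldl hnStepA d).keys = l.foldl hnMagStep mags ∧
    (∀ k ∈ l.foldl hnMagStep mags, 0 < k) ∧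
    (∀ k, k ≠ 0 → (l.foldl hnStepA d).getD k 0 = d.getD k 0 + (l.filter (fun n => |n| = k)).sum) := by
  induction l generalizing d mags with
  | nil => exact ⟨hk, hpos, fun k _ => by simp⟩
  | cons num tl ih =>
    simp only [List.foldl_cons]
    by_cases h0 : |num| = 0
    · have ha : hnStepA d num = d := by simp [hnStepA, h0]
      have hb : hnMagStep mags num = mags := by simp [hnMagStep, h0]
      rw [ha, hb]
      obtain ⟨h1, h2, h3⟩ := ih d mags hk hpos
      refine ⟨h1, h2, fun k hk0 => ?_⟩
      have : |num| ≠ k := fun h => hk0 (h ▸ h0)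
      simpa [List.filter_cons, this] using h3 k hk0
    · have hcont : d.contains |num| = decide (|num| ∈ mags) := by
        rw [PySem.Dict.contains_eq_decide_mem_keys, hk]
      by_cases hm : |num| ∈ mags
      · -- already present: A updates value, B leaves the list
        have ha : hnStepA d num = d.insert |num| (d.getD |num| 0 + num) := by
          simp [hnStepA, h0, hcont, hm]
        have hb : hnMagStep mags num = mags := by simp [hnMagStep, hm]
        rw [ha, hb]
        have hk' : (d.insert |num| (d.getD |num| 0 + num)).keys = mags := by
          rw [PySem.Dict.keys_insert_of_contains _ _ (by simp [hcont, hm]), hk]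
        obtain ⟨h1, h2, h3⟩ := ih _ mags hk' hpos
        refine ⟨h1, h2, fun k hk0 => ?_⟩
        rw [h3 k hk0, PySem.Dict.getD_insert]
        by_cases hkk : k = |num|
        · simp [hkk]; ring
        · have : ¬ |num| = k := fun h => hkk h.symm
          simp [hkk, this]
      · -- first sight: A inserts num, B appends the magnitude
        have ha : hnStepA d num = d.insert |num| num := by
          simp [hnStepA, h0, hcont, hm]
        have hb : hnMagStep mags num = mags ++ [|num|] := by simp [hnMagStep, h0, hm]
        rw [ha, hb]
        have hc' : d.contains |num| = false := by simp [hcont, hm]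
        have hk' : (d.insert |num| num).keys = mags ++ [|num|] := by
          rw [PySem.Dict.keys_insert_of_not_contains _ _ hc', hk]
        have hpos' : ∀ k ∈ mags ++ [|num|], 0 < k := by
          intro k hkmem
          rcases List.mem_append.mp hkmem with h | h
          · exact hpos k h
          · simp only [List.mem_singleton] at h
            subst h
            rcases abs_pos.mpr (fun h => h0 (by simp [h]) : num ≠ 0) with h
            exact h
        obtain ⟨h1, h2, h3⟩ := ih _ _ hk' hpos'
        refine ⟨h1, h2, fun k hk0 => ?_⟩
        rw [h3 k hk0, PySem.Dict.getD_insert]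
        by_cases hkk : k = |num|
        · have hz : d.getD k 0 = 0 := by
            rw [hkk]; exact PySem.Dict.getD_of_not_contains d 0 hc'
          simp only [hkk] at hz ⊢
          simp [hz]
        · have : ¬ |num| = k := fun h => hkk h.symm
          simp [hkk, this]

-- for a positive magnitude, the signed sum of its occurrences is k·(count k − count (−k))
theorem hn_filter_sum (l : List Int) (k : Int) (hkpos : 0 < k) :
    (l.filter (fun n => |n| = k)).sum = k * (l.count k : Int) - k * (l.count (-k) : Int) := by
  induction l with
  | nil => simp
  | cons n tl ih =>
    by_cases h : |n| = k
    · rcases abs_eq (le_of_lt hkpos) |>.mp h with h' | h'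
      · -- n = k
        have hne : ¬ (k = -k) := by omega
        simp only [h', List.filter_cons, List.count_cons]
        simp [abs_of_pos hkpos, hne, ih]
        ring
      · -- n = -k
        have hne : ¬ (-k = k) := by omega
        simp only [h', List.filter_cons, List.count_cons]
        simp [abs_of_pos hkpos, hne, ih]
        ring
    · have h1 : ¬ (n = k) := fun he => h (by simp [he, abs_of_pos hkpos])
      have h2 : ¬ (n = -k) := fun he => h (by simp [he, abs_of_pos hkpos])
      simp [h, h1, h2, ih]

-- ===== VERDICT (by name: the statement is the Claim_ definition above) =====
theorem has_negatives_spec : Claim_equal_has_negatives := by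
  intro arr _
  unfold Spec_has_negatives
  simp only [has_negatives, has_negatives_alt]
  obtain ⟨hk, hpos, hv⟩ := hn_loop_inv arr PySem.Dict.empty [] (by simp) (by simp)
  set sums := arr.foldl hnStepA PySem.Dict.empty
  -- the pair fold's list component is the list-only dedup fold
  rw [hn_pair_fst arr [] PySem.Set.empty (fun x => by simp [PySem.Set.empty])]
  -- B's count dict is Counter(arr)
  have hcnt : arr.foldl hnCountStep PySem.Dict.empty = PySem.Dict.counter arr :=
    PySem.Dict.foldl_insert_getD_add_one_eq_counter arr
  rw [hcnt, PySem.List.foldl_append_ite_eq_filter, List.nil_append, hk]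
  apply List.filter_congr
  intro k hkmem
  have hkpos := hpos k hkmem
  have hk0 : k ≠ 0 := by omega
  have : sums.getD k 0 = k * (arr.count k : Int) - k * (arr.count (-k) : Int) := by
    rw [hv k hk0, PySem.Dict.getD_empty, hn_filter_sum arr k hkpos]
    ring
  rw [this]
  simp only [PySem.Dict.getD_counter]
  rw [Bool.eq_iff_iff]
  simp only [decide_eq_true_eq, beq_iff_eq]
  constructor
  · intro h
    exact mul_left_cancel₀ (by omega : k ≠ 0) (sub_eq_zero.mp h)
  · intro h
    rw [h]; ring
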